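-- pv_equiv track=rewrite | github.com/sareemmomin21/Nutri-Fit | backend/nutrition_utils.py | clean_food_name
-- ===== SOURCE A (Python) =====
-- def clean_food_name(name: str) -> str:
--     """Clean up food names from USDA"""
--     # Remove extra whitespace
--     name = ' '.join(name.split())
--
--     # Remove common suffixes that make names too long
--     suffixes_to_remove = [
--         ', raw', ', cooked', ', boiled', ', steamed', ', baked',
--         ', fresh', ', frozen', ', canned', ', dried',
--         ', without salt', ', with salt', ', unsalted', ', salted',
--         ', whole', ', chopped', ', sliced', ', diced'
--     ]
--
--     name_lower = name.lower()
--     for suffix in suffixes_to_remove: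
--         if name_lower.endswith(suffix):
--             name = name[:-len(suffix)]
--             break
--
--     # Capitalize properly
--     return name.title()
-- ===== SOURCE B (Python) =====
-- _BARE = frozenset({
--     'raw', 'cooked', 'boiled', 'steamed', 'baked',
--     'fresh', 'frozen', 'canned', 'dried',
--     'without salt', 'with salt', 'unsalted', 'salted',
--     'whole', 'chopped', 'sliced', 'diced',
-- })
--
--
-- def _titlecase(s: str) -> str:
--     """Single-pass title-caser: a letter is uppercased iff it does not
--     follow another letter (exactly str.title() on ASCII text)."""
--     res = []
--     prev_alpha = False
--     for ch in s:
--         if ch.isalpha():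
--             res.append(ch.lower() if prev_alpha else ch.upper())
--             prev_alpha = True
--         else:
--             res.append(ch)
--             prev_alpha = False
--     return ''.join(res)
--
--
-- def clean_food_name(name: str) -> str:
--     """Clean up food names from USDA"""
--     # Remove extra whitespace
--     name = ' '.join(name.split())
--
--     # Drop a trailing descriptor: split at the last comma-space separator and look the bare
--     # token up in a set, instead of scanning every suffix with endswith.
--     head, sep, tail = name.rpartition(', ')
--     if sep and tail.lower() in _BARE:
--         name = head
--
--     # Capitalize properly
--     return _titlecase(name)
-- ===== Notes on version B (the rewrite author's own statement) =====
-- stated objective: alternative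
-- what changed: B replaces A's per-suffix endswith scan by a single rpartition at the last comma-space separator followed by one set lookup of the bare token, and title-cases in one explicit accumulator pass instead of str.title().
import Mathlib
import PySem

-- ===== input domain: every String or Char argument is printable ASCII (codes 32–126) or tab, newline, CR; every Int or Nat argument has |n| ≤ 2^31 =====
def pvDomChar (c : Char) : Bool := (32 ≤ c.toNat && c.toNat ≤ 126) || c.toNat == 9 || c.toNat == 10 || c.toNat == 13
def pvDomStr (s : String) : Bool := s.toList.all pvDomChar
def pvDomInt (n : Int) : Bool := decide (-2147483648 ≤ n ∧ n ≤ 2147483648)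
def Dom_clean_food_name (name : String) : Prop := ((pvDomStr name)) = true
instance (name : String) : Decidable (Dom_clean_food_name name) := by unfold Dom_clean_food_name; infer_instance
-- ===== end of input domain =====

-- B replaces A's per-suffix endswith scan by one rpartition at the last comma-space separator plus a set
-- lookup of the bare token, and title-cases in one explicit accumulator pass (objective:
-- alternative; same cost).

-- ===== PORT A =====
-- hand port of str.title(), exact on ASCII (a letter is uppercased iff the
-- previous character is not a letter, other characters pass through)
def pvTitleChars : List Char → Bool → List Char
  | [], _ => []
  | c :: cs, prevCased =>
    if PySem.Chars.isalpha c then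
      (if prevCased then PySem.Chars.lowerChar c else PySem.Chars.upperChar c) :: pvTitleChars cs true
    else c :: pvTitleChars cs false

def pvSuffixes : List (List Char) :=
  [", raw".toList, ", cooked".toList, ", boiled".toList, ", steamed".toList, ", baked".toList,
   ", fresh".toList, ", frozen".toList, ", canned".toList, ", dried".toList,
   ", without salt".toList, ", with salt".toList, ", unsalted".toList, ", salted".toList,
   ", whole".toList, ", chopped".toList, ", sliced".toList, ", diced".toList]

-- the for-loop with break: first suffix that matches strips, then stop
def pvCfnLoop (low nm : List Char) : List (List Char) → List Char
  | [] => nm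
  | s :: rest =>
    if PySem.Chars.endswith low s then PySem.Chars.slice nm none (some (-(s.length : Int)))
    else pvCfnLoop low nm rest

def clean_food_name (name : String) : String :=
  let name1 := (PySem.Str.join " " (PySem.Str.split₀ name)).toList
  String.ofList (pvTitleChars (pvCfnLoop (PySem.Chars.lower name1) name1 pvSuffixes) false)

-- ===== PORT B =====
def pvBare : PySem.Set (List Char) :=
  PySem.Set.ofList
    ["raw".toList, "cooked".toList, "boiled".toList, "steamed".toList, "baked".toList,
     "fresh".toList, "frozen".toList, "canned".toList, "dried".toList,
     "without salt".toList, "with salt".toList, "unsalted".toList, "salted".toList,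
     "whole".toList, "chopped".toList, "sliced".toList, "diced".toList]

-- hand port of Source B's _titlecase: one accumulator pass (res, prev_alpha)
def pvTitlecaseB (cs : List Char) : String :=
  String.ofList
    (cs.foldl
      (fun st ch =>
        if PySem.Chars.isalpha ch then
          (st.1 ++ [if st.2 then PySem.Chars.lowerChar ch else PySem.Chars.upperChar ch], true)
        else (st.1 ++ [ch], false))
      (([] : List Char), false)).1

-- hand port of Source B's rpartition call restricted to how B uses it: some (head, tail)
-- split at the LAST occurrence of the comma-space separator, none when it does not occur (exact)
def pvRpart : List Char → Option (List Char × List Char)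
  | [] => none
  | c :: cs =>
    match pvRpart cs with
    | some (h, t) => some (c :: h, t)
    | none => if c = ',' ∧ cs.head? = some ' ' then some ([], cs.tail) else none

def clean_food_name_alt (name : String) : String :=
  let name1 := (PySem.Str.join " " (PySem.Str.split₀ name)).toList
  pvTitlecaseB (match pvRpart name1 with
    | some (h, t) => if PySem.Set.contains pvBare (PySem.Chars.lower t) then h else name1
    | none => name1)

-- ===== PRECONDITION & SPEC =====
def Spec_clean_food_name (name : String) (out : String) : Prop := out = clean_food_name_alt name
instance (name : String) (out : String) : Decidable (Spec_clean_food_name name out) := by unfold Spec_clean_food_name; infer_instance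

-- ===== CLAIM (what is proved, stated in full; the proofs are below) =====
def Claim_equal_clean_food_name : Prop := ∀ (name : String), Dom_clean_food_name name → Spec_clean_food_name name (clean_food_name name)

-- ===== LEMMAS AND PROOFS =====

-- B's accumulator pass computes the same characters as A's structural recursion
theorem pvTitlecaseB_eq_aux (cs : List Char) (acc : List Char) (prev : Bool) :
    (cs.foldl
      (fun st ch =>
        if PySem.Chars.isalpha ch then
          (st.1 ++ [if st.2 then PySem.Chars.lowerChar ch else PySem.Chars.upperChar ch], true)
        else (st.1 ++ [ch], false))
      (acc, prev)).1 = acc ++ pvTitleChars cs prev := by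
  induction cs generalizing acc prev with
  | nil => simp [pvTitleChars]
  | cons c cs ih =>
    rw [List.foldl_cons, pvTitleChars]
    by_cases hc : PySem.Chars.isalpha c = true
    · simp only [hc, if_true, ih]
      simp
    · simp only [hc, if_false, Bool.false_eq_true, ih]
      simp

theorem pvTitlecaseB_eq (cs : List Char) :
    pvTitlecaseB cs = String.ofList (pvTitleChars cs false) := by
  unfold pvTitlecaseB
  rw [pvTitlecaseB_eq_aux]
  simp

-- lowerChar fixes every character below 'A'; ',' and ' ' are such characters
theorem pvLowerChar_eq_low (c d : Char) (hd : d.toNat < 65) :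
    PySem.Chars.lowerChar c = d ↔ c = d := by
  unfold PySem.Chars.lowerChar
  by_cases hu : PySem.Chars.isupper c = true
  · have hb : 65 ≤ c.toNat ∧ c.toNat ≤ 90 := by
      unfold PySem.Chars.isupper at hu
      simp only [Bool.and_eq_true, decide_eq_true_eq] at hu
      exact ⟨hu.1, hu.2⟩
    rw [if_pos hu]
    have hv : (c.toNat + 32).isValidChar := Or.inl (by omega)
    have htn : (Char.ofNat (c.toNat + 32)).toNat = c.toNat + 32 := by
      rw [Char.toNat_ofNat, if_pos hv]
    constructor
    · intro heq
      have := congrArg Char.toNat heq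
      rw [htn] at this
      omega
    · intro heq
      subst heq
      omega
  · rw [if_neg hu]

theorem pvLowerChar_comma (c : Char) : PySem.Chars.lowerChar c = ',' ↔ c = ',' :=
  pvLowerChar_eq_low c ',' (by decide)

theorem pvLowerChar_space (c : Char) : PySem.Chars.lowerChar c = ' ' ↔ c = ' ' :=
  pvLowerChar_eq_low c ' ' (by decide)

theorem pvRpart_ne_none (h t : List Char) : pvRpart (h ++ ',' :: ' ' :: t) ≠ none := by
  induction h with
  | nil =>
    intro hcontra
    rw [List.nil_append, pvRpart] at hcontra
    cases hp : pvRpart (' ' :: t) with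
    | some p =>
      obtain ⟨h1, t1⟩ := p
      rw [hp] at hcontra
      simp at hcontra
    | none =>
      rw [hp] at hcontra
      simp at hcontra
  | cons c h ih =>
    cases hp : pvRpart (h ++ ',' :: ' ' :: t) with
    | none => exact absurd hp ih
    | some p => simp [pvRpart, hp]

theorem pvRpart_append (h t : List Char) (ht : pvRpart t = none) :
    pvRpart (h ++ ',' :: ' ' :: t) = some (h, t) := by
  induction h with
  | nil =>
    simp [pvRpart, ht]
  | cons c h ih =>
    simp [pvRpart, ih]

theorem pvRpart_some (cs h t : List Char) (hcs : pvRpart cs = some (h, t)) :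
    cs = h ++ ',' :: ' ' :: t ∧ pvRpart t = none := by
  induction cs generalizing h t with
  | nil => simp [pvRpart] at hcs
  | cons c cs ih =>
    rw [pvRpart] at hcs
    cases hp : pvRpart cs with
    | some p =>
      obtain ⟨h', t'⟩ := p
      rw [hp] at hcs
      simp only [Option.some.injEq, Prod.mk.injEq] at hcs
      obtain ⟨hh, htt⟩ := hcs
      subst hh; subst htt
      obtain ⟨e1, e2⟩ := ih _ _ hp
      subst e1
      exact ⟨by simp, e2⟩
    | none =>
      rw [hp] at hcs
      split_ifs at hcs with hcond
      · obtain ⟨hc, hh⟩ := hcond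
        subst hc
        cases cs with
        | nil => simp at hh
        | cons c2 rest =>
          simp only [List.head?_cons, Option.some.injEq] at hh
          subst hh
          simp only [List.tail_cons, Option.some.injEq, Prod.mk.injEq] at hcs
          obtain ⟨hh2, htt⟩ := hcs
          subst hh2; subst htt
          refine ⟨by simp, ?_⟩
          rw [pvRpart] at hp
          cases hq : pvRpart rest with
          | some p =>
            obtain ⟨a, b⟩ := p
            rw [hq] at hp
            simp at hp
          | none => rfl

theorem pvRpart_lower_none (cs : List Char) (hcs : pvRpart cs = none) :
    pvRpart (PySem.Chars.lower cs) = none := by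
  cases hq : pvRpart (PySem.Chars.lower cs) with
  | none => rfl
  | some p =>
    exfalso
    obtain ⟨h, t⟩ := p
    obtain ⟨heq, -⟩ := pvRpart_some _ _ _ hq
    unfold PySem.Chars.lower at heq
    rw [show h ++ ',' :: ' ' :: t = h ++ [','] ++ (' ' :: t) from by simp] at heq
    rw [List.map_eq_append_iff] at heq
    obtain ⟨a, b, rfl, ha, hb⟩ := heq
    rw [List.map_eq_append_iff] at ha
    obtain ⟨a1, a2, rfl, ha1, ha2⟩ := ha
    rw [List.map_eq_cons_iff] at ha2
    obtain ⟨c1, l1, rfl, hc1, hl1⟩ := ha2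
    rw [List.map_eq_nil_iff] at hl1
    subst hl1
    rw [List.map_eq_cons_iff] at hb
    obtain ⟨c2, l2, rfl, hc2, hl2⟩ := hb
    rw [pvLowerChar_comma] at hc1
    rw [pvLowerChar_space] at hc2
    subst hc1; subst hc2
    exact pvRpart_ne_none a1 l2 (by simpa using hcs)

theorem pvRpart_lower_some (cs h t : List Char) (hcs : pvRpart cs = some (h, t)) :
    pvRpart (PySem.Chars.lower cs) = some (PySem.Chars.lower h, PySem.Chars.lower t) := by
  obtain ⟨heq, ht⟩ := pvRpart_some _ _ _ hcs
  subst heq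
  have hmap : PySem.Chars.lower (h ++ ',' :: ' ' :: t) =
      PySem.Chars.lower h ++ ',' :: ' ' :: PySem.Chars.lower t := by
    unfold PySem.Chars.lower
    simp [List.map_append]
    constructor <;> decide
  rw [hmap]
  exact pvRpart_append _ _ (pvRpart_lower_none t ht)

theorem pvSuffix_iff (cs h t u : List Char) (hcs : pvRpart cs = some (h, t)) (hu : ',' ∉ u) :
    (',' :: ' ' :: u <:+ PySem.Chars.lower cs) ↔ u = PySem.Chars.lower t := by
  have h5 := pvRpart_lower_some _ _ _ hcs
  obtain ⟨heq, hnone⟩ := pvRpart_some _ _ _ h5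
  constructor
  · intro hsuf
    have h2 : ',' :: ' ' :: PySem.Chars.lower t <:+ PySem.Chars.lower cs := by
      rw [heq]; exact List.suffix_append _ _
    rcases List.suffix_or_suffix_of_suffix hsuf h2 with hc | hc
    · obtain ⟨p, hp⟩ := hc
      match p, hp with
      | [], hp => simpa using hp
      | [x], hp => simp at hp
      | x :: y :: p'', hp =>
        exfalso
        simp only [List.cons_append, List.cons.injEq] at hp
        obtain ⟨rfl, rfl, hp⟩ := hp
        exact pvRpart_ne_none p'' u (hp ▸ hnone)
    · obtain ⟨p, hp⟩ := hc
      match p, hp with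
      | [], hp => simpa using hp.symm
      | [x], hp => simp at hp
      | x :: y :: p'', hp =>
        exfalso
        simp only [List.cons_append, List.cons.injEq] at hp
        obtain ⟨rfl, rfl, hp⟩ := hp
        exact hu (by rw [← hp]; simp)
  · intro hseq
    subst hseq
    rw [heq]
    exact List.suffix_append _ _

theorem pvNoSep_no_suffix (cs u : List Char) (hcs : pvRpart cs = none) :
    ¬ (',' :: ' ' :: u <:+ PySem.Chars.lower cs) := by
  intro hsuf
  obtain ⟨p, hp⟩ := hsuf
  exact pvRpart_ne_none p u (hp ▸ pvRpart_lower_none cs hcs)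

theorem pvSlice_take (h t : List Char) :
    PySem.Chars.slice (h ++ ',' :: ' ' :: t) none (some (-((t.length + 2 : Nat) : Int))) = h := by
  rw [PySem.Chars.slice_eq_listSlice]
  unfold PySem.List.slice PySem.List.clampIdx
  simp only [List.length_append, List.length_cons]
  have h1 : (-((t.length + 2 : Nat) : Int) < 0) := by omega
  have h2 : ¬ (((h.length + (t.length + 1 + 1) : Nat) : Int) + -((t.length + 2 : Nat) : Int) < 0) := by
    push_cast; omega
  rw [if_pos h1, if_neg h2]
  have h3 : (((h.length + (t.length + 1 + 1) : Nat) : Int) + -((t.length + 2 : Nat) : Int)).toNat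
      = h.length := by omega
  rw [h3]
  simp

theorem pvLoop_none (cs : List Char) (L : List (List Char)) (hcs : pvRpart cs = none)
    (hL : ∀ s ∈ L, s.take 2 = [',', ' ']) :
    pvCfnLoop (PySem.Chars.lower cs) cs L = cs := by
  induction L with
  | nil => rfl
  | cons s rest ih =>
    have hs : s = ',' :: ' ' :: s.drop 2 := by
      conv_lhs => rw [← List.take_append_drop 2 s]
      rw [hL s (List.mem_cons_self)]
      rfl
    have hE : ¬ (PySem.Chars.endswith (PySem.Chars.lower cs) s = true) := by
      rw [PySem.Chars.endswith_iff, hs]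
      exact pvNoSep_no_suffix cs (s.drop 2) hcs
    rw [pvCfnLoop, if_neg hE]
    exact ih (fun x hx => hL x (List.mem_cons_of_mem _ hx))

theorem pvLoop_some (cs h t : List Char) (L : List (List Char)) (hcs : pvRpart cs = some (h, t))
    (hL : ∀ s ∈ L, s.take 2 = [',', ' '] ∧ ',' ∉ s.drop 2) :
    pvCfnLoop (PySem.Chars.lower cs) cs L =
      if PySem.Chars.lower t ∈ L.map (List.drop 2) then h else cs := by
  induction L with
  | nil => simp [pvCfnLoop]
  | cons s rest ih =>
    obtain ⟨hs2, hu⟩ := hL s (List.mem_cons_self)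
    have hs : s = ',' :: ' ' :: s.drop 2 := by
      conv_lhs => rw [← List.take_append_drop 2 s]
      rw [hs2]
      rfl
    by_cases hmatch : s.drop 2 = PySem.Chars.lower t
    · have hE : PySem.Chars.endswith (PySem.Chars.lower cs) s = true := by
        rw [PySem.Chars.endswith_iff, hs]
        exact (pvSuffix_iff cs h t (s.drop 2) hcs hu).mpr hmatch
      rw [pvCfnLoop, if_pos hE]
      have hlen : s.length = t.length + 2 := by
        rw [hs]
        simp only [List.length_cons]
        rw [hmatch]
        unfold PySem.Chars.lower
        rw [List.length_map]
      have hcseq : cs = h ++ ',' :: ' ' :: t := (pvRpart_some _ _ _ hcs).1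
      rw [hcseq, hlen, show ((t.length + 2 : Nat) : Int) = ((t.length : Nat) + 2 : Nat) from by push_cast; ring]
      rw [pvSlice_take]
      simp [hmatch]
    · have hE : ¬ (PySem.Chars.endswith (PySem.Chars.lower cs) s = true) := by
        rw [PySem.Chars.endswith_iff, hs]
        intro hsuf
        exact hmatch ((pvSuffix_iff cs h t (s.drop 2) hcs hu).mp hsuf)
      rw [pvCfnLoop, if_neg hE]
      rw [ih (fun x hx => hL x (List.mem_cons_of_mem _ hx))]
      have hne : ¬ (PySem.Chars.lower t = s.drop 2) := fun e => hmatch e.symm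
      simp [hne]

theorem pvBare_eq : pvSuffixes.map (List.drop 2) = (pvBare : List (List Char)) := by decide

theorem pvMain (cs : List Char) :
    pvCfnLoop (PySem.Chars.lower cs) cs pvSuffixes =
      (match pvRpart cs with
       | some (h, t) => if PySem.Set.contains pvBare (PySem.Chars.lower t) then h else cs
       | none => cs) := by
  cases hr : pvRpart cs with
  | none =>
    rw [pvLoop_none cs pvSuffixes hr (by decide)]
  | some p =>
    obtain ⟨h, t⟩ := p
    rw [pvLoop_some cs h t pvSuffixes hr (by decide)]
    show (if PySem.Chars.lower t ∈ pvSuffixes.map (List.drop 2) then h else cs)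
        = if PySem.Set.contains pvBare (PySem.Chars.lower t) = true then h else cs
    have hset : (PySem.Chars.lower t ∈ pvSuffixes.map (List.drop 2)) ↔
        PySem.Set.contains pvBare (PySem.Chars.lower t) = true := by
      rw [pvBare_eq]
      simp [PySem.Set.contains]
    by_cases hx : PySem.Chars.lower t ∈ pvSuffixes.map (List.drop 2)
    · rw [if_pos hx, if_pos (hset.mp hx)]
    · rw [if_neg hx, if_neg (fun hc => hx (hset.mpr hc))]

-- ===== VERDICT (by name: the statement is the Claim_ definition above) =====
theorem clean_food_name_spec : Claim_equal_clean_food_name := by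
  intro name _
  unfold Spec_clean_food_name clean_food_name clean_food_name_alt
  rw [pvTitlecaseB_eq]
  exact congrArg (fun l => String.ofList (pvTitleChars l false)) (pvMain _)
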